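-- pv_equiv track=rewrite | github.com/fu402138670/Patent_Analysis | Presentation1/keywords_count.py | find_keywords_in_range
-- ===== SOURCE A (Python) =====
-- def find_keywords_in_range(texts, patterns):
--     # 解析關鍵字和範圍
--     results = []
--
--     for pattern in patterns:
--         comma_count = pattern.count(',')
--         if comma_count == 0:
--             keyword1 = pattern
--             for i, word in enumerate(texts):
--                 if word == keyword1:
--                     results.append((i, i))
--         else:
--             for i in range(comma_count):
--                 keyword1, parts = pattern.split('[', 1)
--                 range_start, range_end = int(parts.split(',', 1)[0]), int(parts.split(']', 1)[0].split(',')[1])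
--                 keyword2 = parts.split(']', 1)[1].split('[')[0] if '[' in parts.split(']', 1)[1] \
--                     else parts.split(']', 1)[1]
--                 pattern = pattern.split(']', 1)[1]
--
--                 for i, word in enumerate(texts):
--                     if word == keyword1:
--                         start_index = max(0, i + range_start)
--                         end_index = min(i + range_end + 1, len(texts))
--                         for j in range(start_index, end_index):
--                             if texts[j] == keyword2 and j != i:
--                                 results.append((i, j))
--     return results
-- ===== SOURCE B (Python) =====
-- def find_keywords_in_range(texts, patterns):
--     # Index texts once (word -> list of its indices); each pattern's bracket
--     # specs are extracted up front by a recursive helper, then matching is a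
--     # comprehension over the two occurrence lists instead of window scans.
--     pos = {}
--     for i, w in enumerate(texts):
--         pos.setdefault(w, []).append(i)
--     n = len(texts)
--
--     def specs(pattern, k):
--         if k == 0:
--             return []
--         keyword1, parts = pattern.split('[', 1)
--         a = int(parts.split(',', 1)[0])
--         b = int(parts.split(']', 1)[0].split(',')[1])
--         rest = parts.split(']', 1)[1]
--         keyword2 = rest.split('[')[0] if '[' in rest else rest
--         return [(keyword1, keyword2, a, b)] + specs(rest, k - 1)
--
--     results = []
--     for pattern in patterns:
--         c = pattern.count(',')
--         if c == 0:
--             results += [(i, i) for i in pos.get(pattern, [])]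
--         else:
--             for k1, k2, a, b in specs(pattern, c):
--                 results += [(i, j)
--                             for i in pos.get(k1, [])
--                             for j in pos.get(k2, [])
--                             if max(0, i + a) <= j < min(i + b + 1, n) and j != i]
--     return results
-- ===== Notes on version B (the rewrite author's own statement) =====
-- stated objective: alternative
-- what changed: B builds a word->occurrence-index dictionary over texts once and, per pattern, extracts all bracket specs up front with a recursive parser, then matches by a comprehension over the two occurrence lists, instead of A's stateful loop that re-splits the pattern each round and re-scans texts with a per-occurrence window scan.
-- outside the precondition, e.g. on find_keywords_in_range(['a]b', 'c'], ['a]b[0,1]c']): A returns [(0, 1)], B returns [(0, 1)]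
import Mathlib
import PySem

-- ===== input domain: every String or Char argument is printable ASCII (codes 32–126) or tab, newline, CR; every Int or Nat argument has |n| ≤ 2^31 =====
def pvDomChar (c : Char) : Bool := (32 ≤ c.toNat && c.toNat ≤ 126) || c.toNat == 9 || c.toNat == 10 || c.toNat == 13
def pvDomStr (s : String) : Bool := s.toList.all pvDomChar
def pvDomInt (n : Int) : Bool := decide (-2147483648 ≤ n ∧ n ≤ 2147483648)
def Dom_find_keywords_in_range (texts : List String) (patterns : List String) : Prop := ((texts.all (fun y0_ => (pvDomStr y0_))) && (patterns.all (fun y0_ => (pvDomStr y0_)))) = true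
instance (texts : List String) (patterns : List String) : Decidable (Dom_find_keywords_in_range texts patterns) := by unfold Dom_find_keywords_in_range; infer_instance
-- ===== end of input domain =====

-- B replaces A's stateful pattern-stripping loop and repeated scans of texts by a
-- recursive spec extractor plus a word -> occurrence-index dictionary built once
-- (alternative decomposition, same results).

-- ===== PORT A =====
-- the parsing lines of one loop round (identical lines appear in Source A and in Source B's
-- recursive helper, so both ports share this helper)
def pvParse (p : String) : String × String × Int × Int × String :=
  let ps := (PySem.Str.splitMax? p "[" 1).getD []
  let keyword1 := ps.getD 0 ""
  let parts := ps.getD 1 ""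
  let range_start := (PySem.Int.ofStr? (((PySem.Str.splitMax? parts "," 1).getD []).getD 0 "")).getD 0
  let br := (PySem.Str.splitMax? parts "]" 1).getD []
  let range_end := (PySem.Int.ofStr? (((PySem.Str.split? (br.getD 0 "") ",").getD []).getD 1 "")).getD 0
  let after := br.getD 1 ""
  let keyword2 := if PySem.Str.isIn "[" after then ((PySem.Str.split? after "[").getD []).getD 0 "" else after
  (keyword1, keyword2, range_start, range_end, after)

def find_keywords_in_range (texts : List String) (patterns : List String) : List (Int × Int) :=
  patterns.foldl (fun results pattern =>
    if PySem.Str.count pattern "," == 0 then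
      (PySem.List.enumerate texts).foldl
        (fun acc p => if p.2 == pattern then acc ++ [(p.1, p.1)] else acc) results
    else
      ((PySem.List.pyRange 0 ((PySem.Str.count pattern "," : Nat) : Int) 1).foldl
        (fun (st : String × List (Int × Int)) _ =>
          ((pvParse st.1).2.2.2.2,
            (PySem.List.enumerate texts).foldl (fun acc p =>
              if p.2 == (pvParse st.1).1 then
                (PySem.List.pyRange (max 0 (p.1 + (pvParse st.1).2.2.1))
                    (min (p.1 + (pvParse st.1).2.2.2.1 + 1) (PySem.List.len texts)) 1).foldl
                  (fun acc2 j =>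
                    if PySem.List.pyGetD texts j "" == (pvParse st.1).2.1 && j != p.1 then
                      acc2 ++ [(p.1, j)]
                    else acc2) acc
              else acc) st.2)) (pattern, results)).2) []

-- ===== PORT B =====
-- Source B: pos = {}; for i, w in enumerate(texts): pos.setdefault(w, []).append(i)
def pvIndex (texts : List String) : PySem.Dict String (List Int) :=
  (PySem.List.enumerate texts).foldl (fun d p => d.modify p.2 [] (· ++ [p.1])) PySem.Dict.empty

-- Source B's recursive helper 'specs(pattern, k)' (its parsing lines are pvParse)
def pvSpecs (pattern : String) : Nat → List (String × String × Int × Int)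
  | 0 => []
  | k + 1 =>
    let q := pvParse pattern
    (q.1, q.2.1, q.2.2.1, q.2.2.2.1) :: pvSpecs q.2.2.2.2 k

def find_keywords_in_range_alt (texts : List String) (patterns : List String) : List (Int × Int) :=
  let pos := pvIndex texts
  let n := PySem.List.len texts
  patterns.foldl (fun results pattern =>
    let c := PySem.Str.count pattern ","
    if c == 0 then
      results ++ (pos.getD pattern []).map (fun i => (i, i))
    else
      (pvSpecs pattern c).foldl (fun r sp =>
        r ++ (pos.getD sp.1 []).flatMap (fun i =>
          ((pos.getD sp.2.1 []).filter (fun j =>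
              (decide (max 0 (i + sp.2.2.1) ≤ j) && decide (j < min (i + sp.2.2.2 + 1) n)) && j != i)).map
            (fun j => (i, j)))) results) []

-- ===== PRECONDITION & SPEC =====
-- Pre_ admits the comma-free patterns and the bracketed patterns of the grammar
-- k1[i1,j1]k2[i2,j2]...kn (keywords free of ',' and ']', int fields valid Python int
-- literals): exactly the patterns A parses without raising ValueError/IndexError.
-- This is slightly narrower than "A returns": on a bracketed pattern whose leading
-- keyword contains ']' (see the cite in claim.json) A still returns, because the
-- mis-placed reassignment of 'pattern' is never used again; B returns the same value there.
-- one bracket group "k[i,j" (as cut out by splitting the pattern at ']'):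
-- keyword comma-free, then '[', then two valid Python int literals around one comma
def pvSegOK (s : List Char) : Bool :=
  ((s.takeWhile (· != '[')).all (· != ',')) &&
  !((s.dropWhile (· != '[')).isEmpty) &&
  ((s.dropWhile (· != '[')).tail.contains ',') &&
  (PySem.Int.ofChars? ((s.dropWhile (· != '[')).tail.takeWhile (· != ','))).isSome &&
  (!(((s.dropWhile (· != '[')).tail.dropWhile (· != ',')).tail.contains ',')) &&
  (PySem.Int.ofChars? (((s.dropWhile (· != '[')).tail.dropWhile (· != ',')).tail)).isSome

-- comma-free, or: splitting at ']', a nonempty run of bracket groups "k[i,j"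
-- followed by a comma-free remainder
def pvWfChars (cs : List Char) : Bool :=
  !cs.contains ',' ||
  (decide (1 ≤ ((cs.splitOn ']').takeWhile (fun s => s.contains ',')).length) &&
   decide (((cs.splitOn ']').takeWhile (fun s => s.contains ',')).length < (cs.splitOn ']').length) &&
   ((cs.splitOn ']').takeWhile (fun s => s.contains ',')).all pvSegOK &&
   ((cs.splitOn ']').drop ((cs.splitOn ']').takeWhile (fun s => s.contains ',')).length).all
     (fun s => !s.contains ','))

def Pre_find_keywords_in_range (texts : List String) (patterns : List String) : Prop :=
  ∀ p ∈ patterns, pvWfChars p.toList = true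
instance (texts : List String) (patterns : List String) : Decidable (Pre_find_keywords_in_range texts patterns) := by
  unfold Pre_find_keywords_in_range; infer_instance

def pvWitness_find_keywords_in_range : List String × List String :=
  (["a", "b", "a"], ["a", "a[0,1]b"])

def Spec_find_keywords_in_range (texts : List String) (patterns : List String) (out : List (Int × Int)) : Prop := out = find_keywords_in_range_alt texts patterns
instance (texts : List String) (patterns : List String) (out : List (Int × Int)) : Decidable (Spec_find_keywords_in_range texts patterns out) := by unfold Spec_find_keywords_in_range; infer_instance

-- ===== CLAIM (what is proved, stated in full; the proofs are below) =====
def Claim_equal_find_keywords_in_range : Prop := ∀ (texts : List String) (patterns : List String), Dom_find_keywords_in_range texts patterns → Pre_find_keywords_in_range texts patterns → Spec_find_keywords_in_range texts patterns (find_keywords_in_range texts patterns)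

-- ===== LEMMAS AND PROOFS =====
def posL (texts : List String) (w : String) : List Int :=
  ((PySem.List.enumerate texts).filter (fun p => p.2 == w)).map (·.1)

theorem posL_eq (texts : List String) (w : String) :
    posL texts w = (PySem.List.pyRange 0 (PySem.List.len texts) 1).filter
      (fun j => PySem.List.pyGetD texts j "" == w) := by
  unfold posL
  rw [PySem.List.enumerate_eq_map_pyRange (d := "")]
  rw [List.filter_map, List.map_map]
  simp [PySem.List.len_eq, Function.comp_def]

theorem range_eq_filter (lo hi n : Int) (h0 : 0 ≤ lo) (hn : hi ≤ n) :
    PySem.List.pyRange lo hi 1 = (PySem.List.pyRange 0 n 1).filter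
      (fun j => decide (lo ≤ j) && decide (j < hi)) := by
  have hperm : (PySem.List.pyRange lo hi 1).Perm ((PySem.List.pyRange 0 n 1).filter
      (fun j => decide (lo ≤ j) && decide (j < hi))) := by
    rw [List.perm_ext_iff_of_nodup (PySem.List.nodup_pyRange_one lo hi)
      (List.Nodup.filter _ (PySem.List.nodup_pyRange_one 0 n))]
    intro x
    simp [PySem.List.mem_pyRange_one]
    omega
  exact List.Perm.eq_of_pairwise' (r := (· < ·)) (PySem.List.pairwise_lt_pyRange_one lo hi)
    (List.Pairwise.filter _ (PySem.List.pairwise_lt_pyRange_one 0 n)) hperm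

theorem foldl_if_append {α β : Type} (l : List α) (p : α → Bool) (g : α → List β) (acc : List β) :
    l.foldl (fun acc x => if p x then acc ++ g x else acc) acc = acc ++ (l.filter p).flatMap g := by
  induction l generalizing acc with
  | nil => simp
  | cons x xs ih =>
    simp only [List.foldl_cons, List.filter_cons]
    by_cases h : p x <;> simp [h, ih]

theorem pvIndex_getD (texts : List String) (w : String) :
    (pvIndex texts).getD w [] = posL texts w := by
  unfold pvIndex
  have h : (PySem.List.enumerate texts).foldl (fun d p => d.modify p.2 [] (· ++ [p.1]))
      (PySem.Dict.empty : PySem.Dict String (List Int))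
      = ((PySem.List.enumerate texts).map (fun p => (p.2, p.1))).foldl
          (fun d q => d.modify q.1 [] (· ++ [q.2])) PySem.Dict.empty := by
    rw [List.foldl_map]
  rw [h, PySem.Dict.getD_foldl_modify_append]
  unfold posL
  simp [List.filter_map, List.map_map, Function.comp_def]

def blockN (texts : List String) (k2 : String) (i a b : Int) : List (Int × Int) :=
  (((PySem.List.pyRange 0 (PySem.List.len texts) 1).filter
      (fun j => PySem.List.pyGetD texts j "" == k2)).filter
    (fun j => (decide (max 0 (i + a) ≤ j) && decide (j < min (i + b + 1) (PySem.List.len texts))) && j != i)).map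
    (fun j => (i, j))

theorem blockA_eq (texts : List String) (k2 : String) (i a b : Int) :
    ((PySem.List.pyRange (max 0 (i + a)) (min (i + b + 1) (PySem.List.len texts)) 1).filter
        (fun j => PySem.List.pyGetD texts j "" == k2 && j != i)).map (fun j => (i, j))
      = blockN texts k2 i a b := by
  unfold blockN
  rw [range_eq_filter (max 0 (i + a)) (min (i + b + 1) (PySem.List.len texts)) (PySem.List.len texts)
      (le_max_left _ _) (min_le_right _ _)]
  rw [List.filter_filter, List.filter_filter]
  congr 1
  apply List.filter_congr
  intro j _
  cases PySem.List.pyGetD texts j "" == k2 <;> cases decide (max 0 (i + a) ≤ j) <;>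
    cases decide (j < min (i + b + 1) (PySem.List.len texts)) <;> cases j != i <;> rfl

theorem blockB_eq (texts : List String) (k2 : String) (i a b : Int) :
    ((posL texts k2).filter
        (fun j => (decide (max 0 (i + a) ≤ j) && decide (j < min (i + b + 1) (PySem.List.len texts))) && j != i)).map
      (fun j => (i, j)) = blockN texts k2 i a b := by
  unfold blockN
  rw [posL_eq]

theorem innerA (texts : List String) (k1 k2 : String) (a b : Int) (rs : List (Int × Int)) :
    (PySem.List.enumerate texts).foldl (fun acc p =>
        if p.2 == k1 then
          (PySem.List.pyRange (max 0 (p.1 + a)) (min (p.1 + b + 1) (PySem.List.len texts)) 1).foldl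
            (fun acc2 j =>
              if PySem.List.pyGetD texts j "" == k2 && j != p.1 then acc2 ++ [(p.1, j)] else acc2) acc
        else acc) rs
      = rs ++ (posL texts k1).flatMap (fun i => blockN texts k2 i a b) := by
  have hstep : (fun (acc : List (Int × Int)) (p : Int × String) =>
        if p.2 == k1 then
          (PySem.List.pyRange (max 0 (p.1 + a)) (min (p.1 + b + 1) (PySem.List.len texts)) 1).foldl
            (fun acc2 j =>
              if PySem.List.pyGetD texts j "" == k2 && j != p.1 then acc2 ++ [(p.1, j)] else acc2) acc
        else acc)
      = (fun acc p => if p.2 == k1 then acc ++ blockN texts k2 p.1 a b else acc) := by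
    funext acc p
    by_cases h : (p.2 == k1) = true
    · simp only [h, if_true]
      rw [PySem.List.foldl_append_if, blockA_eq]
    · simp at h
      simp [h]
  rw [hstep, foldl_if_append]
  congr 1
  unfold posL
  rw [List.flatMap_map]

-- the A-side round step: parse once, scan texts, strip the leading group
def stepA (texts : List String) : String × List (Int × Int) → String × List (Int × Int) :=
  fun st =>
    ((pvParse st.1).2.2.2.2,
      (PySem.List.enumerate texts).foldl (fun acc p =>
        if p.2 == (pvParse st.1).1 then
          (PySem.List.pyRange (max 0 (p.1 + (pvParse st.1).2.2.1))
              (min (p.1 + (pvParse st.1).2.2.2.1 + 1) (PySem.List.len texts)) 1).foldl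
            (fun acc2 j =>
              if PySem.List.pyGetD texts j "" == (pvParse st.1).2.1 && j != p.1 then
                acc2 ++ [(p.1, j)]
              else acc2) acc
        else acc) st.2)

def specBlock (texts : List String) (sp : String × String × Int × Int) : List (Int × Int) :=
  (posL texts sp.1).flatMap (fun i => blockN texts sp.2.1 i sp.2.2.1 sp.2.2.2)

theorem foldl_ignore {α β : Type} (F : α → α) (l : List β) (a : α) :
    l.foldl (fun st _ => F st) a = F^[l.length] a := by
  induction l generalizing a with
  | nil => rfl
  | cons x xs ih => simp [List.foldl_cons, ih, Function.iterate_succ_apply]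

theorem iterA (texts : List String) : ∀ (k : Nat) (s : String) (rs : List (Int × Int)),
    ((stepA texts)^[k] (s, rs)).2 = rs ++ (pvSpecs s k).flatMap (specBlock texts) := by
  intro k
  induction k with
  | zero => intro s rs; simp [pvSpecs]
  | succ k ih =>
    intro s rs
    rw [Function.iterate_succ_apply]
    have hs : stepA texts (s, rs)
        = ((pvParse s).2.2.2.2,
            rs ++ specBlock texts ((pvParse s).1, (pvParse s).2.1, (pvParse s).2.2.1, (pvParse s).2.2.2.1)) := by
      unfold stepA specBlock
      simp only
      rw [innerA]
    rw [hs, ih]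
    show _ = rs ++ (pvSpecs s (k + 1)).flatMap (specBlock texts)
    simp [pvSpecs, List.flatMap_cons, List.append_assoc]

theorem find_keywords_eq (texts patterns : List String) :
    find_keywords_in_range texts patterns = find_keywords_in_range_alt texts patterns := by
  unfold find_keywords_in_range find_keywords_in_range_alt
  simp only
  congr 1
  funext results pattern
  by_cases hc : (PySem.Str.count pattern "," == 0) = true
  · simp only [hc, if_true]
    rw [PySem.List.foldl_append_if, pvIndex_getD]
    unfold posL
    simp [List.map_map, Function.comp_def]
  · have hc' : (PySem.Str.count pattern "," == 0) = false := by simpa using hc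
    simp only [hc', Bool.false_eq_true, if_false]
    -- A side: the round-loop is stepA iterated count-many times
    have hA : ((PySem.List.pyRange 0 ((PySem.Str.count pattern "," : Nat) : Int) 1).foldl
          (fun st _ => stepA texts st) (pattern, results)).2
        = results ++ (pvSpecs pattern (PySem.Str.count pattern ",")).flatMap (specBlock texts) := by
      rw [foldl_ignore, PySem.List.length_pyRange_one]
      have hlen : ((((PySem.Str.count pattern "," : Nat) : Int) - 0).toNat) = PySem.Str.count pattern "," := by
        omega
      rw [hlen, iterA]
    refine Eq.trans hA ?_
    -- B side: the spec fold is results ++ flatMap of the per-spec blocks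
    have hB : (fun (r : List (Int × Int)) (sp : String × String × Int × Int) =>
          r ++ ((pvIndex texts).getD sp.1 []).flatMap (fun i =>
            (((pvIndex texts).getD sp.2.1 []).filter (fun j =>
                (decide (max 0 (i + sp.2.2.1) ≤ j) &&
                  decide (j < min (i + sp.2.2.2 + 1) (PySem.List.len texts))) && j != i)).map
              (fun j => (i, j))))
        = (fun r sp => r ++ specBlock texts sp) := by
      funext r sp
      unfold specBlock
      rw [pvIndex_getD, pvIndex_getD]
      congr 1
      congr 1
      funext i
      rw [blockB_eq]
    rw [hB, PySem.List.foldl_append_eq_flatMap]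

-- ===== VERDICT (by name: the statement is the Claim_ definition above) =====
theorem find_keywords_in_range_spec : Claim_equal_find_keywords_in_range := by
  intro texts patterns _ _
  unfold Spec_find_keywords_in_range
  exact find_keywords_eq texts patterns
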